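-- pv_equiv track=rewrite | github.com/codingGoover/CodingTest | Programmers/외톨이 알파벳.py | solution
-- ===== SOURCE A (Python) =====
-- def solution(input_string):
--     answer = ''
--     alpha={}
--     for idx,c in enumerate(input_string):
--         if alpha.get(c,0)==0:
--             alpha[c]=[idx]
--         else:
--             alpha[c].append(idx)
--
--     for key in alpha:
--         if len(alpha[key])>=2:
--             for i in range(len(alpha[key])-1):
--                 if alpha[key][i+1] - alpha[key][i]>1:
--                     answer+=key
--                     break
--
--
--     return ''.join(sorted(answer)) if answer!='' else 'N'
-- ===== SOURCE B (Python) =====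
-- def solution(input_string):
--     last = {}
--     lonely = set()
--     for idx, c in enumerate(input_string):
--         if c in last and idx - last[c] > 1:
--             lonely.add(c)
--         last[c] = idx
--     return ''.join(sorted(lonely)) if lonely else 'N'
-- ===== Notes on version B (the rewrite author's own statement) =====
-- stated objective: simpler
-- what changed: Replaces A's two phases (group all occurrence indices per character into a dict of lists, then re-scan every list for an adjacent gap) with one streaming pass keeping only each character's last-seen index and a set of already-flagged characters.
import Mathlib
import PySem

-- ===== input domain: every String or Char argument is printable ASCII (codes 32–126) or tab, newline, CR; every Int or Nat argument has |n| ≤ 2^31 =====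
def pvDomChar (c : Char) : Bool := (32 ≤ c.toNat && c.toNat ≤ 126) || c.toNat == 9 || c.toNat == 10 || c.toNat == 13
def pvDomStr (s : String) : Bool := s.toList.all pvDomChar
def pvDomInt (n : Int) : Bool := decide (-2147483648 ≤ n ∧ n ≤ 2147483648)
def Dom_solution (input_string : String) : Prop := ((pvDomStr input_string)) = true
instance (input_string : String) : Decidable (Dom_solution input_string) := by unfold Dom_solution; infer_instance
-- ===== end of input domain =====

-- B replaces A's two phases (dict of per-character index lists, then a gap re-scan of every
-- list) by one streaming pass keeping only each character's last index and a set of flagged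
-- characters; same return value, different decomposition (objective: simpler).

-- ===== PORT A =====
-- first loop body: 'alpha.get(c,0)==0' is true exactly when c is not yet a key (values are nonempty lists)
def solStepA (alpha : PySem.Dict Char (List Int)) (p : Int × Char) : PySem.Dict Char (List Int) :=
  match alpha.get? p.2 with
  | none => alpha.insert p.2 [p.1]
  | some l => alpha.insert p.2 (l ++ [p.1])   -- alpha[c].append(idx)

-- inner 'for i in range(len(alpha[key])-1): if l[i+1]-l[i]>1: …; break' — consecutive-pair scan, stop at first hit
def solScanGap : List Int → Bool
  | a :: b :: rest => if b - a > 1 then true else solScanGap (b :: rest)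
  | _ => false

def solution (input_string : String) : String :=
  let alpha := (PySem.List.enumerate input_string.toList 0).foldl solStepA PySem.Dict.empty
  -- 'for key in alpha: … alpha[key] …' iterates the dict's items in insertion order
  let answer : List Char := alpha.items.foldl
    (fun ans p => if p.2.length ≥ 2 ∧ solScanGap p.2 = true then ans ++ [p.1] else ans) []
  if answer ≠ [] then String.ofList (PySem.List.sorted answer (fun x => x) false) else "N"

-- ===== PORT B =====
def solStepB (st : PySem.Dict Char Int × PySem.Set Char) (p : Int × Char)
    : PySem.Dict Char Int × PySem.Set Char :=
  let lonely := match st.1.get? p.2 with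
    | some prev => if p.1 - prev > 1 then PySem.Set.add st.2 p.2 else st.2
    | none => st.2
  (st.1.insert p.2 p.1, lonely)

def solution_alt (input_string : String) : String :=
  let st := (PySem.List.enumerate input_string.toList 0).foldl solStepB
              (PySem.Dict.empty, PySem.Set.empty)
  if st.2 ≠ ([] : List Char) then String.ofList (PySem.List.sorted st.2 (fun x => x) false) else "N"

-- ===== PRECONDITION & SPEC =====
def Spec_solution (input_string : String) (out : String) : Prop := out = solution_alt input_string
instance (input_string : String) (out : String) : Decidable (Spec_solution input_string out) := by unfold Spec_solution; infer_instance

-- ===== CLAIM (what is proved, stated in full; the proofs are below) =====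
def Claim_equal_solution : Prop := ∀ (input_string : String), Dom_solution input_string → Spec_solution input_string (solution input_string)

-- ===== LEMMAS AND PROOFS =====

-- the invariant relating A's dict of index lists to B's (last-index dict, lonely set)
def solInv (alpha : PySem.Dict Char (List Int)) (last : PySem.Dict Char Int)
    (lonely : PySem.Set Char) : Prop :=
  alpha.keys.Nodup ∧ lonely.Nodup ∧
  (∀ c, last.get? c = (alpha.get? c).bind List.getLast?) ∧
  (∀ c l, alpha.get? c = some l → l ≠ []) ∧
  (∀ c, c ∈ lonely ↔ ∃ l, alpha.get? c = some l ∧ solScanGap l = true)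

theorem solScanGap_append : ∀ (l : List Int) (a : Int) (h : l ≠ []),
    solScanGap (l ++ [a]) = (solScanGap l || decide (a - l.getLast h > 1))
  | [], _, h => absurd rfl h
  | [x], a, _ => by simp [solScanGap]
  | x :: y :: u, a, h => by
    have ih := solScanGap_append (y :: u) a (by simp)
    by_cases hxy : y - x > 1
    · simp [solScanGap, hxy]
    · simp only [List.cons_append, solScanGap, if_neg hxy] at ih ⊢
      rw [ih, List.getLast_cons (by simp : (y :: u) ≠ [])]

theorem solInv_step (alpha : PySem.Dict Char (List Int)) (last : PySem.Dict Char Int)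
    (lonely : PySem.Set Char) (idx : Int) (c : Char) (h : solInv alpha last lonely) :
    solInv (solStepA alpha (idx, c)) (solStepB (last, lonely) (idx, c)).1
      (solStepB (last, lonely) (idx, c)).2 := by
  obtain ⟨hk, hnd, hlast, hne, hmem⟩ := h
  cases hget : alpha.get? c with
  | none =>
    have hlc : last.get? c = none := by rw [hlast c, hget]; rfl
    have hcont : alpha.contains c = false := by
      rw [PySem.Dict.contains_eq_isSome_get?, hget]; rfl
    have hnotmem : c ∉ alpha.keys := fun hm =>
      by rw [← PySem.Dict.contains_iff_mem_keys] at hm; rw [hcont] at hm; cases hm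
    unfold solInv
    simp only [solStepA, solStepB, hget, hlc]
    refine ⟨?_, hnd, ?_, ?_, ?_⟩
    · rw [PySem.Dict.keys_insert_of_not_contains alpha _ hcont]
      rw [List.nodup_append]
      refine ⟨hk, List.nodup_singleton c, ?_⟩
      rintro a ha b hb rfl
      simp at hb; subst hb
      exact hnotmem ha
    · intro x
      by_cases hxc : x = c
      · subst hxc
        rw [PySem.Dict.get?_insert_self, PySem.Dict.get?_insert_self]; rfl
      · rw [PySem.Dict.get?_insert_of_ne _ _ hxc, PySem.Dict.get?_insert_of_ne _ _ hxc,
          hlast x]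
    · intro x l hx
      by_cases hxc : x = c
      · subst hxc; rw [PySem.Dict.get?_insert_self] at hx
        cases hx; simp
      · rw [PySem.Dict.get?_insert_of_ne _ _ hxc] at hx
        exact hne x l hx
    · intro x
      by_cases hxc : x = c
      · subst hxc
        rw [PySem.Dict.get?_insert_self]
        constructor
        · intro hmx
          rcases (hmem x).1 hmx with ⟨l, hl, _⟩
          rw [hget] at hl; cases hl
        · rintro ⟨l, hl, hs⟩
          cases hl
          simp [solScanGap] at hs
      · rw [PySem.Dict.get?_insert_of_ne _ _ hxc]
        exact hmem x
  | some l0 =>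
    have hne0 : l0 ≠ [] := hne c l0 hget
    have hcont : alpha.contains c = true := by
      rw [PySem.Dict.contains_eq_isSome_get?, hget]; rfl
    have hlc : last.get? c = some (l0.getLast hne0) := by
      rw [hlast c, hget]
      simp [List.getLast?_eq_some_getLast hne0]
    unfold solInv
    simp only [solStepA, solStepB, hget, hlc]
    refine ⟨?_, ?_, ?_, ?_, ?_⟩
    · rw [PySem.Dict.keys_insert_of_contains alpha _ hcont]
      exact hk
    · split
      · exact PySem.Set.nodup_add lonely c hnd
      · exact hnd
    · intro x
      by_cases hxc : x = c
      · subst hxc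
        rw [PySem.Dict.get?_insert_self, PySem.Dict.get?_insert_self]
        simp
      · rw [PySem.Dict.get?_insert_of_ne _ _ hxc, PySem.Dict.get?_insert_of_ne _ _ hxc,
          hlast x]
    · intro x l hx
      by_cases hxc : x = c
      · subst hxc; rw [PySem.Dict.get?_insert_self] at hx
        cases hx; simp
      · rw [PySem.Dict.get?_insert_of_ne _ _ hxc] at hx
        exact hne x l hx
    · intro x
      by_cases hxc : x = c
      · subst hxc
        rw [PySem.Dict.get?_insert_self]
        have h1 : x ∈ lonely ↔ solScanGap l0 = true := by
          rw [hmem x]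
          constructor
          · rintro ⟨l, hl, hs⟩; rw [hget] at hl; cases hl; exact hs
          · intro hs; exact ⟨l0, hget, hs⟩
        split
        · next hcond =>
          simp [PySem.Set.mem_add, h1, solScanGap_append l0 idx hne0, hcond]
        · next hcond =>
          have : ¬ (1 < idx - l0.getLast hne0) := by
            intro hlt; exact hcond hlt
          simp [h1, solScanGap_append l0 idx hne0, this]
      · rw [PySem.Dict.get?_insert_of_ne _ _ hxc]
        have h2 : ∀ s' : PySem.Set Char,
            (s' = PySem.Set.add lonely c ∨ s' = lonely) → (x ∈ s' ↔ x ∈ lonely) := by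
          rintro s' (rfl | rfl)
          · rw [PySem.Set.mem_add]; simp [hxc]
          · rfl
        have h3 : (x ∈ (if 1 < idx - l0.getLast hne0 then PySem.Set.add lonely c else lonely))
            ↔ x ∈ lonely := by
          split
          · exact h2 _ (Or.inl rfl)
          · exact h2 _ (Or.inr rfl)
        rw [h3]
        exact hmem x

theorem solInv_foldl (l : List (Int × Char)) (alpha : PySem.Dict Char (List Int))
    (last : PySem.Dict Char Int) (lonely : PySem.Set Char) (h : solInv alpha last lonely) :
    solInv (l.foldl solStepA alpha) (l.foldl solStepB (last, lonely)).1
      (l.foldl solStepB (last, lonely)).2 := by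
  induction l generalizing alpha last lonely with
  | nil => exact h
  | cons p t ih =>
    obtain ⟨idx, c⟩ := p
    simp only [List.foldl_cons]
    have hstep := solInv_step alpha last lonely idx c h
    cases heq : solStepB (last, lonely) (idx, c) with
    | mk l1 l2 =>
      rw [heq] at hstep
      exact ih _ l1 l2 hstep

-- A's answer loop is an append-if fold, i.e. a filter-map of the items
theorem sol_fold_filter {α β : Type} (P : α → Prop) [DecidablePred P] (f : α → β)
    (l : List α) (acc : List β) :
    l.foldl (fun ans x => if P x then ans ++ [f x] else ans) acc
      = acc ++ (l.filter (fun x => decide (P x))).map f := by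
  induction l generalizing acc with
  | nil => simp
  | cons x t ih => by_cases h : P x <;> simp [h, ih]

theorem solScanGap_length (l : List Int) (h : solScanGap l = true) : l.length ≥ 2 := by
  cases l with
  | nil => simp [solScanGap] at h
  | cons a t =>
    cases t with
    | nil => simp [solScanGap] at h
    | cons b u => simp

theorem sol_final (alpha : PySem.Dict Char (List Int))
    (st : PySem.Dict Char Int × PySem.Set Char) (h : solInv alpha st.1 st.2) :
    (let answer : List Char := alpha.items.foldl
      (fun ans p => if p.2.length ≥ 2 ∧ solScanGap p.2 = true then ans ++ [p.1] else ans) []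
     if answer ≠ [] then String.ofList (PySem.List.sorted answer (fun x => x) false) else "N")
    = (if st.2 ≠ ([] : List Char) then
        String.ofList (PySem.List.sorted st.2 (fun x => x) false) else "N") := by
  obtain ⟨hk, hnd, _, _, hmem⟩ := h
  show (if (alpha.items.foldl
      (fun ans p => if p.2.length ≥ 2 ∧ solScanGap p.2 = true then ans ++ [p.1] else ans) []) ≠ []
    then _ else _) = _
  set answer := alpha.items.foldl
    (fun ans p => if p.2.length ≥ 2 ∧ solScanGap p.2 = true then ans ++ [p.1] else ans) []
    with hans
  have hansval : answer = ((alpha.items.filter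
      (fun p => decide (p.2.length ≥ 2 ∧ solScanGap p.2 = true))).map (·.1)) := by
    rw [hans, sol_fold_filter]; simp
  have hanssub : answer.Sublist alpha.keys := by
    rw [hansval]
    have h1 : (alpha.items.filter
        (fun p => decide (p.2.length ≥ 2 ∧ solScanGap p.2 = true))).Sublist alpha.items :=
      List.filter_sublist
    have h2 := List.Sublist.map (f := (Prod.fst : Char × List Int → Char)) h1
    simpa [PySem.Dict.keys] using h2
  have hansnd : answer.Nodup := List.Sublist.nodup hanssub hk
  have hansmem : ∀ c, c ∈ answer ↔ c ∈ st.2 := by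
    intro c
    rw [hansval, hmem c]
    constructor
    · intro hc
      simp only [List.mem_map, List.mem_filter] at hc
      obtain ⟨⟨k, l⟩, ⟨hi, hp⟩, hfst⟩ := hc
      simp only [decide_eq_true_eq] at hp
      cases hfst
      exact ⟨l, PySem.Dict.get?_of_mem_items alpha hi hk, hp.2⟩
    · rintro ⟨l, hl, hs⟩
      simp only [List.mem_map, List.mem_filter]
      refine ⟨(c, l), ⟨PySem.Dict.mem_items_of_get?_eq_some alpha hl, ?_⟩, rfl⟩
      simp [hs, solScanGap_length l hs]
  have hperm : answer.Perm st.2 :=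
    (List.perm_ext_iff_of_nodup hansnd hnd).2 hansmem
  by_cases hempty : st.2 = ([] : List Char)
  · have hae : answer = [] := by
      rw [hempty] at hperm; exact hperm.eq_nil
    rw [if_neg (by simp [hae]), if_neg (by simp [hempty])]
  · have hane : answer ≠ [] := fun h0 => hempty ((h0 ▸ hperm).symm.eq_nil)
    rw [if_pos hane, if_pos hempty,
      PySem.List.sorted_eq_sorted_of_perm answer st.2 (fun x => x) (fun a b h => h) hperm]

theorem solution_eq_alt (input_string : String) :
    solution input_string = solution_alt input_string := by
  have hinv0 : solInv PySem.Dict.empty PySem.Dict.empty PySem.Set.empty := by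
    refine ⟨by simp [PySem.Dict.keys_empty], List.nodup_nil, ?_, ?_, ?_⟩
    · intro c; simp [PySem.Dict.get?_empty]
    · intro c l h; simp [PySem.Dict.get?_empty] at h
    · intro c
      constructor
      · intro hc; cases hc
      · rintro ⟨l, hl, _⟩; simp [PySem.Dict.get?_empty] at hl
  have hinv := solInv_foldl (PySem.List.enumerate input_string.toList 0)
    PySem.Dict.empty PySem.Dict.empty PySem.Set.empty hinv0
  unfold solution solution_alt
  exact sol_final _ _ hinv

-- ===== VERDICT (by name: the statement is the Claim_ definition above) =====
theorem solution_spec : Claim_equal_solution := by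
  intro s _
  exact solution_eq_alt s
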